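-- pv_equiv track=rewrite | github.com/rakki-18/blaze | wallet_address.py | get_eth_name
-- ===== SOURCE A (Python) =====
-- def get_eth_name(str):
--     cur_word = ""
--     for element in str:
--         if element == ' ':
--             cur_word = ""
--         else:
--             cur_word = cur_word + element
--             if cur_word.endswith('.eth'):
--                 return cur_word
-- ===== SOURCE B (Python) =====
-- def get_eth_name(str):
--     idx = str.find('.eth')
--     if idx == -1:
--         return None
--     start = str.rfind(' ', 0, idx) + 1
--     return str[start:idx + 4]
-- ===== Notes on version B (the rewrite author's own statement) =====
-- stated objective: faster
-- what changed: Replaced A's character-by-character scan, which rebuilds the current word and re-tests its suffix at every character, with two substring index searches (find the pattern, then rfind the preceding space) and a single slice.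
import Mathlib
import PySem

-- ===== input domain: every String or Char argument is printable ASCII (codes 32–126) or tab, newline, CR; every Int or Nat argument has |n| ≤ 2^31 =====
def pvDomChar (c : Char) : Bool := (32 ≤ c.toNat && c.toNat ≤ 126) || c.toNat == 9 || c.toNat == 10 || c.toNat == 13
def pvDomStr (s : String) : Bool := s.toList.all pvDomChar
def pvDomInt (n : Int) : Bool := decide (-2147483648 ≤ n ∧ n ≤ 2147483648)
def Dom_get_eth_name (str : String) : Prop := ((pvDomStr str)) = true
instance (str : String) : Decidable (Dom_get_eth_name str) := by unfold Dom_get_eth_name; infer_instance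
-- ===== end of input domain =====

-- B replaces A's character-accumulation loop by two index searches (find / rfind) and one slice; return values proved equal on all inputs.

-- ===== PORT A =====
-- the loop over the characters with the accumulated current word
def getEthGo : List Char → List Char → Option String
  | [], _ => none
  | c :: rest, cur =>
    if c = ' ' then getEthGo rest []
    else
      let cur' := cur ++ [c]
      if PySem.Chars.endswith cur' ['.', 'e', 't', 'h'] then some (String.ofList cur')
      else getEthGo rest cur'

def get_eth_name (str : String) : Option String := getEthGo str.toList []

-- ===== PORT B =====
def get_eth_name_alt (str : String) : Option String :=
  let idx := PySem.Str.find str ".eth"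
  if idx = -1 then none
  else
    let start := PySem.Str.rfindFrom str " " 0 (some idx) + 1
    some (PySem.Str.slice str (some start) (some (idx + 4)))

-- ===== PRECONDITION & SPEC =====
def Spec_get_eth_name (str : String) (out : Option String) : Prop := out = get_eth_name_alt str
instance (str : String) (out : Option String) : Decidable (Spec_get_eth_name str out) := by unfold Spec_get_eth_name; infer_instance

-- ===== CLAIM (what is proved, stated in full; the proofs are below) =====
def Claim_equal_get_eth_name : Prop := ∀ (str : String), Dom_get_eth_name str → Spec_get_eth_name str (get_eth_name str)

-- ===== LEMMAS AND PROOFS =====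

-- the pattern '.eth' as a list of characters
def ethPat : List Char := ['.', 'e', 't', 'h']

-- B's computation expressed over the character list (bridged to get_eth_name_alt below)
def coreB (m : List Char) : Option String :=
  let idx := PySem.Chars.find m ethPat
  if idx = -1 then none
  else
    let start := PySem.Chars.rfindFrom m [' '] 0 (some idx) + 1
    some (String.ofList (PySem.Chars.slice m (some start) (some (idx + 4))))

theorem alt_eq_coreB (s : String) : get_eth_name_alt s = coreB s.toList := by
  have h1 : (".eth" : String).toList = ethPat := by decide
  have h2 : (" " : String).toList = [' '] := by decide
  simp only [get_eth_name_alt, coreB, PySem.Str.find_eq, PySem.Str.rfindFrom_eq, h1, h2]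
  split_ifs with h
  · rfl
  · rw [← PySem.Str.toList_slice, String.ofList_toList]

theorem infix_iff_prefix_drop (p l : List Char) : p <:+: l ↔ ∃ i, p <+: l.drop i := by
  constructor
  · rintro ⟨s, t, rfl⟩
    exact ⟨s.length, by simp⟩
  · rintro ⟨i, h⟩
    exact h.isInfix.trans (List.drop_suffix i l).isInfix

theorem find_go_ge (sub : List Char) : ∀ (t : List Char) (k : Nat),
    PySem.Chars.find.go sub t k = -1 ∨ (k : Int) ≤ PySem.Chars.find.go sub t k := by
  intro t
  induction t with
  | nil =>
    intro k
    simp only [PySem.Chars.find.go]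
    split_ifs
    · right; simp
    · left; rfl
  | cons c t ih =>
    intro k
    rw [PySem.Chars.find.go]
    split_ifs
    · right; simp
    · rcases ih (k+1) with h | h
      · left; exact h
      · right; push_cast at h ⊢; omega

theorem find_go_first (sub : List Char) (i0 : Nat) :
    ∀ (m : List Char) (k : Nat), (∀ i < i0, ¬ sub.isPrefixOf (m.drop i)) →
      sub.isPrefixOf (m.drop i0) → PySem.Chars.find.go sub m k = (k : Int) + i0 := by
  induction i0 with
  | zero =>
    intro m k _ hp
    simp only [List.drop_zero] at hp
    match m with
    | [] =>
      simp only [List.isPrefixOf_iff_prefix, List.prefix_nil] at hp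
      simp [PySem.Chars.find.go, hp, List.isEmpty_nil]
    | c :: t =>
      rw [PySem.Chars.find.go, if_pos hp]
      simp
  | succ n ih =>
    intro m k h0 hp
    match m with
    | [] =>
      simp only [List.drop_nil, List.isPrefixOf_iff_prefix, List.prefix_nil] at hp
      exact absurd (by simp [hp]) (h0 0 (by omega))
    | c :: t =>
      rw [PySem.Chars.find.go, if_neg (by simpa using h0 0 (by omega))]
      rw [ih t (k+1) (fun i hi => by simpa using h0 (i+1) (by omega)) (by simpa using hp)]
      push_cast; ring

theorem rfind_go_none (s sub : List Char) (j : Nat)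
    (h : ∀ i ≤ j, ¬ sub.isPrefixOf (s.drop i)) : PySem.Chars.rfind.go s sub j = -1 := by
  induction j with
  | zero =>
    rw [PySem.Chars.rfind.go, if_neg (by simpa using h 0 le_rfl)]
  | succ n ih =>
    rw [PySem.Chars.rfind.go, if_neg (h (n+1) le_rfl)]
    exact ih (fun i hi => h i (by omega))

theorem rfind_go_last (s sub : List Char) (j i0 : Nat) (hij : i0 ≤ j)
    (hm : sub.isPrefixOf (s.drop i0)) (hn : ∀ i, i0 < i → i ≤ j → ¬ sub.isPrefixOf (s.drop i)) :
    PySem.Chars.rfind.go s sub j = (i0 : Int) := by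
  induction j with
  | zero =>
    have : i0 = 0 := by omega
    subst this
    rw [PySem.Chars.rfind.go, if_pos (by simpa using hm)]
    norm_num
  | succ n ih =>
    by_cases h : i0 = n + 1
    · subst h
      rw [PySem.Chars.rfind.go, if_pos hm]
    · rw [PySem.Chars.rfind.go, if_neg (hn (n+1) (by omega) le_rfl)]
      exact ih (by omega) (fun i h1 h2 => hn i h1 (by omega))

theorem rfind_go_cases (s sub : List Char) (j : Nat) :
    (PySem.Chars.rfind.go s sub j = -1 ∧ ∀ i ≤ j, ¬ sub.isPrefixOf (s.drop i)) ∨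
    (∃ i0 : Nat, PySem.Chars.rfind.go s sub j = (i0 : Int) ∧ i0 ≤ j ∧ sub.isPrefixOf (s.drop i0) ∧
      ∀ i, i0 < i → i ≤ j → ¬ sub.isPrefixOf (s.drop i)) := by
  induction j with
  | zero =>
    by_cases h : sub.isPrefixOf s
    · right
      exact ⟨0, by rw [PySem.Chars.rfind.go, if_pos (by simpa using h)]; norm_num, le_rfl,
        by simpa using h, by omega⟩
    · left
      refine ⟨by rw [PySem.Chars.rfind.go, if_neg (by simpa using h)], ?_⟩
      intro i hi
      have : i = 0 := by omega
      subst this; simpa using h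
  | succ n ih =>
    by_cases h : sub.isPrefixOf (s.drop (n+1))
    · right
      exact ⟨n+1, by rw [PySem.Chars.rfind.go, if_pos h], le_rfl, h, by omega⟩
    · rcases ih with ⟨h1, h2⟩ | ⟨i0, h1, h2, h3, h4⟩
      · left
        refine ⟨by rw [PySem.Chars.rfind.go, if_neg h]; exact h1, ?_⟩
        intro i hi
        by_cases hi' : i = n + 1
        · subst hi'; exact h
        · exact h2 i (by omega)
      · right
        refine ⟨i0, by rw [PySem.Chars.rfind.go, if_neg h]; exact h1, by omega, h3, ?_⟩
        intro i ha hb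
        by_cases hi' : i = n + 1
        · subst hi'; exact h
        · exact h4 i ha (by omega)

theorem rfindFrom_take (m sub : List Char) (i0 : Nat) (h : i0 ≤ m.length) :
    PySem.Chars.rfindFrom m sub 0 (some (i0 : Int)) = PySem.Chars.rfind (m.take i0) sub := by
  simp only [PySem.Chars.rfindFrom]
  rw [if_neg (by omega : ¬ (m.length : Int) < (i0 : Int))]
  rw [if_neg (by omega : ¬ (i0 : Int) < 0)]
  rw [if_neg (by omega : ¬ (0 : Int) < 0)]
  rw [if_neg (by omega : ¬ (i0 : Int) < 0)]
  simp only [Int.toNat_natCast, Int.toNat_zero, List.drop_zero, zero_add]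
  split_ifs with h2
  · exact h2.symm
  · rfl

-- dropping past the separating space lands in r
theorem drop_after (u r : List Char) (j : Nat) :
    (u ++ ' ' :: r).drop (u.length + 1 + j) = r.drop j := by
  rw [show u ++ ' ' :: r = (u ++ [' ']) ++ r by simp]
  rw [List.drop_append]
  rw [List.drop_of_length_le (l := u ++ [' ']) (by simp)]
  rw [List.nil_append]
  congr 1
  simp

-- taking up to a position past the separating space keeps u, the space and a prefix of r
theorem take_after (u r : List Char) (j : Nat) :
    (u ++ ' ' :: r).take (u.length + 1 + j) = u ++ ' ' :: r.take j := by
  rw [show u ++ ' ' :: r = (u ++ [' ']) ++ r by simp]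
  rw [List.take_append]
  rw [List.take_of_length_le (l := u ++ [' ']) (by simp)]
  have h2 : u.length + 1 + j - (u ++ [' ']).length = j := by simp
  rw [h2]
  simp

-- the pattern cannot match at any position i ≤ |u| of u ++ ' ' :: r when it is not an infix of u
theorem no_straddle (u r : List Char) (h : ¬ ethPat <:+: u) (i : Nat) (hi : i ≤ u.length) :
    ¬ ethPat.isPrefixOf ((u ++ ' ' :: r).drop i) := by
  intro hp
  rw [List.isPrefixOf_iff_prefix] at hp
  by_cases hc : i + 4 ≤ u.length
  · have hd : (u ++ ' ' :: r).drop i = u.drop i ++ (' ' :: r) :=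
      List.drop_append_of_le_length (by omega)
    rw [hd, List.prefix_iff_eq_take] at hp
    rw [show ethPat.length = 4 from rfl] at hp
    rw [List.take_append_of_le_length (by simp; omega)] at hp
    have : ethPat <+: u.drop i := hp ▸ List.take_prefix 4 (u.drop i)
    exact h (this.isInfix.trans (List.drop_suffix i u).isInfix)
  · obtain ⟨k, hk⟩ : ∃ k, u.length = i + k := ⟨u.length - i, by omega⟩
    have hk4 : k < 4 := by omega
    have hlen : k < ((u ++ ' ' :: r).drop i).length := by
      simp only [List.length_drop, List.length_append, List.length_cons]
      omega
    have hkp : k < ethPat.length := by simpa [ethPat] using hk4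
    have h1 : ethPat[k]'hkp = ((u ++ ' ' :: r).drop i)[k]'hlen := hp.getElem hkp
    rw [List.getElem_drop] at h1
    have h2 : (u ++ ' ' :: r)[i + k]'(by simp; omega) = ' ' := by
      have hik : i + k = u.length := by omega
      simp only [hik]
      rw [List.getElem_append_right le_rfl]
      simp
    rw [h2] at h1
    interval_cases k <;> simp [ethPat] at h1

-- no occurrence in u and none in r means none in u ++ ' ' :: r
theorem no_infix_append (u r : List Char) (hu : ¬ ethPat <:+: u) (hr : ¬ ethPat <:+: r) :
    ¬ ethPat <:+: (u ++ ' ' :: r) := by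
  intro h
  rw [infix_iff_prefix_drop] at h
  obtain ⟨i, hp⟩ := h
  by_cases hi : i ≤ u.length
  · exact no_straddle u r hu i hi (by rw [List.isPrefixOf_iff_prefix]; exact hp)
  · have : (u ++ ' ' :: r).drop i = r.drop (i - (u.length + 1)) := by
      rw [← drop_after u r (i - (u.length + 1))]
      congr 1
      omega
    rw [this] at hp
    exact hr ((infix_iff_prefix_drop ethPat r).2 ⟨_, hp⟩)

-- a one-character space pattern matches exactly where the character is a space
theorem space_prefix_mem (l : List Char) (h : ([' '] : List Char).isPrefixOf l) : ' ' ∈ l := by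
  match l with
  | [] => simp [List.isPrefixOf] at h
  | c :: t =>
    simp only [List.isPrefixOf, Bool.and_true, beq_iff_eq] at h
    simp [← h]

-- rfind for a space over u ++ ' ' :: v
theorem rfind_space (u v : List Char) :
    PySem.Chars.rfind (u ++ ' ' :: v) [' '] =
      if PySem.Chars.rfind v [' '] = -1 then (u.length : Int)
      else (u.length : Int) + 1 + PySem.Chars.rfind v [' '] := by
  have hfuel : (u ++ ' ' :: v).length = u.length + 1 + v.length := by simp; omega
  have hsp : ([' '] : List Char).isPrefixOf ((u ++ ' ' :: v).drop u.length) := by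
    rw [show u.length = u.length + 1 + 0 - 1 by omega]
    have : (u ++ ' ' :: v).drop u.length = ' ' :: v := by
      rw [List.drop_append_of_le_length le_rfl, List.drop_of_length_le le_rfl]
      simp
    rw [show u.length + 1 + 0 - 1 = u.length by omega, this]
    simp [List.isPrefixOf]
  rcases rfind_go_cases v [' '] v.length with ⟨h1, h2⟩ | ⟨i0, h1, h2, h3, h4⟩
  · rw [show PySem.Chars.rfind v [' '] = PySem.Chars.rfind.go v [' '] v.length from rfl, h1]
    rw [if_pos rfl]
    show PySem.Chars.rfind.go (u ++ ' ' :: v) [' '] (u ++ ' ' :: v).length = _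
    rw [hfuel]
    apply rfind_go_last _ _ _ u.length (by omega) hsp
    intro i hgt hle hpre
    have : (u ++ ' ' :: v).drop i = v.drop (i - (u.length + 1)) := by
      rw [← drop_after u v (i - (u.length + 1))]; congr 1; omega
    rw [this] at hpre
    exact h2 _ (by omega) hpre
  · rw [show PySem.Chars.rfind v [' '] = PySem.Chars.rfind.go v [' '] v.length from rfl, h1]
    rw [if_neg (by omega)]
    show PySem.Chars.rfind.go (u ++ ' ' :: v) [' '] (u ++ ' ' :: v).length = _
    rw [hfuel]
    have := rfind_go_last (u ++ ' ' :: v) [' '] (u.length + 1 + v.length) (u.length + 1 + i0)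
      (by omega) (by rw [drop_after]; exact h3)
      (by
        intro i hgt hle hpre
        have : (u ++ ' ' :: v).drop i = v.drop (i - (u.length + 1)) := by
          rw [← drop_after u v (i - (u.length + 1))]; congr 1; omega
        rw [this] at hpre
        exact h4 _ (by omega) (by omega) hpre)
    rw [this]
    push_cast; ring

-- B's core ignores a non-matching segment before a space
theorem coreB_space (u r : List Char) (h : ¬ ethPat <:+: u) :
    coreB (u ++ ' ' :: r) = coreB r := by
  rcases find_go_ge ethPat r 0 with hf | hf
  · have hr : ¬ ethPat <:+: r := (PySem.Chars.find_eq_neg_one_iff r ethPat).1 hf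
    have hm : PySem.Chars.find (u ++ ' ' :: r) ethPat = -1 :=
      (PySem.Chars.find_eq_neg_one_iff _ ethPat).2 (no_infix_append u r h hr)
    simp [coreB, hm, show PySem.Chars.find r ethPat = -1 from hf]
  · have hf0 : 0 ≤ PySem.Chars.find r ethPat := hf
    set jz := PySem.Chars.find r ethPat with hjz
    obtain ⟨j, hj⟩ : ∃ j : Nat, jz = (j : Int) := ⟨jz.toNat, by omega⟩
    have hne : PySem.Chars.find r ethPat ≠ -1 := by omega
    have hff : PySem.Chars.findFrom r ethPat ((0 : Nat) : Int) = PySem.Chars.find r ethPat := by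
      norm_num [PySem.Chars.findFrom_zero]
    have hspec := PySem.Chars.findFrom_natCast_spec r ethPat 0 (by omega) (by rw [hff]; exact hne)
    rw [hff] at hspec
    obtain ⟨-, hp, hnb⟩ := hspec
    have htn : jz.toNat = j := by omega
    rw [htn] at hp hnb
    -- the pattern fits inside r after position j
    have hj4 : j + 4 ≤ r.length := by
      have := hp.length_le
      simp only [List.length_drop, show ethPat.length = 4 from rfl] at this
      by_cases hle : j ≤ r.length
      · omega
      · rw [List.drop_of_length_le (by omega)] at hp
        simp [List.prefix_nil, ethPat] at hp
    -- the first occurrence in u ++ ' ' :: r is at u.length + 1 + j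
    have hfm : PySem.Chars.find (u ++ ' ' :: r) ethPat = ((u.length + 1 + j : Nat) : Int) := by
      show PySem.Chars.find.go ethPat (u ++ ' ' :: r) 0 = _
      rw [find_go_first ethPat (u.length + 1 + j) _ 0
        (by
          intro i hi
          by_cases hle : i ≤ u.length
          · exact no_straddle u r h i hle
          · intro hpre
            have : (u ++ ' ' :: r).drop i = r.drop (i - (u.length + 1)) := by
              rw [← drop_after u r (i - (u.length + 1))]; congr 1; omega
            rw [this, List.isPrefixOf_iff_prefix] at hpre
            exact hnb _ (by omega) (by omega) hpre)
        (by rw [drop_after, List.isPrefixOf_iff_prefix]; exact hp)]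
      push_cast; ring
    -- unfold both sides
    simp only [coreB, hfm, ← hjz, hj]
    have hne1 : ¬(((u.length + 1 + j : Nat) : Int) = -1) := by push_cast; omega
    have hne2 : ¬(((j : Nat) : Int) = -1) := by omega
    rw [if_neg hne1, if_neg hne2]
    have ha1 : u.length + 1 + j ≤ (u ++ ' ' :: r).length := by simp; omega
    rw [rfindFrom_take (u ++ ' ' :: r) [' '] (u.length + 1 + j) ha1]
    rw [rfindFrom_take r [' '] j (by omega)]
    rw [take_after]
    rw [rfind_space]
    rcases rfind_go_cases (r.take j) [' '] (r.take j).length with ⟨h1, h2⟩ | ⟨i0, h1, h2, h3, h4⟩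
    · rw [show PySem.Chars.rfind (r.take j) [' '] = PySem.Chars.rfind.go (r.take j) [' '] (r.take j).length from rfl, h1]
      rw [if_pos rfl]
      congr 1
      rw [show (-1 : Int) + 1 = ((0 : Nat) : Int) by norm_num]
      rw [show (u.length : Int) + 1 = ((u.length + 1 : Nat) : Int) by push_cast; ring]
      rw [show ((u.length + 1 + j : Nat) : Int) + 4 = ((u.length + 1 + (j + 4) : Nat) : Int) by push_cast; ring]
      rw [show ((j : Nat) : Int) + 4 = ((j + 4 : Nat) : Int) by push_cast; ring]
      rw [PySem.Chars.slice_eq_listSlice, PySem.Chars.slice_eq_listSlice,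
          PySem.List.slice_natCast, PySem.List.slice_natCast]
      rw [show u.length + 1 = u.length + 1 + 0 by omega, drop_after]
      simp only [List.drop_zero, Nat.sub_zero]
      congr 1
      congr 1
      omega
    · have hrv : PySem.Chars.rfind (r.take j) [' '] = (i0 : Int) := h1
      rw [hrv, if_neg (by omega)]
      congr 1
      rw [show ((u.length : Int) + 1 + (i0 : Int)) + 1 = ((u.length + 1 + (i0 + 1) : Nat) : Int) by push_cast; ring]
      rw [show ((i0 : Int)) + 1 = ((i0 + 1 : Nat) : Int) by push_cast; ring]
      rw [show ((u.length + 1 + j : Nat) : Int) + 4 = ((u.length + 1 + (j + 4) : Nat) : Int) by push_cast; ring]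
      rw [show ((j : Nat) : Int) + 4 = ((j + 4 : Nat) : Int) by push_cast; ring]
      rw [PySem.Chars.slice_eq_listSlice, PySem.Chars.slice_eq_listSlice,
          PySem.List.slice_natCast, PySem.List.slice_natCast]
      rw [drop_after]
      congr 1
      congr 1
      omega

-- when the accumulated word first ends with the pattern, coreB returns exactly that word
theorem coreB_found (w rest : List Char) (hsp : ' ' ∉ w) (hsuf : ethPat <:+ w)
    (hfirst : ¬ ethPat <:+: w.dropLast) :
    coreB (w ++ rest) = some (String.ofList w) := by
  have h4 : 4 ≤ w.length := by
    have := hsuf.length_le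
    simpa [ethPat] using this
  set i0 := w.length - 4 with hi0
  obtain ⟨p, hw⟩ := hsuf
  have hplen : p.length = i0 := by
    have h5 : p.length + 4 = w.length := by
      rw [← hw]; simp [ethPat]
    omega
  -- match at i0
  have hmatch : ethPat.isPrefixOf ((w ++ rest).drop i0) := by
    rw [show w ++ rest = p ++ (ethPat ++ rest) by rw [← hw]; simp]
    rw [← hplen, List.drop_append]
    rw [List.drop_of_length_le le_rfl, Nat.sub_self, List.drop_zero, List.nil_append]
    simp [List.isPrefixOf_iff_prefix]
  -- no match before i0
  have hbefore : ∀ i < i0, ¬ ethPat.isPrefixOf ((w ++ rest).drop i) := by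
    intro i hi hpre
    rw [List.isPrefixOf_iff_prefix, List.prefix_iff_eq_take,
        show ethPat.length = 4 from rfl,
        List.drop_append_of_le_length (by omega),
        List.take_append_of_le_length (by simp; omega)] at hpre
    -- the window lies inside w.dropLast
    have hsub : (w.drop i).take 4 = (w.dropLast.drop i).take 4 := by
      rw [List.dropLast_eq_take, List.drop_take, List.take_take]
      congr 1
      omega
    rw [hsub] at hpre
    have : ethPat <+: w.dropLast.drop i := hpre ▸ List.take_prefix 4 _
    exact hfirst (this.isInfix.trans (List.drop_suffix i w.dropLast).isInfix)
  have hfm : PySem.Chars.find (w ++ rest) ethPat = ((i0 : Nat) : Int) := by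
    show PySem.Chars.find.go ethPat (w ++ rest) 0 = _
    rw [find_go_first ethPat i0 _ 0 hbefore hmatch]
    push_cast; ring
  simp only [coreB, hfm]
  rw [if_neg (show ¬(((i0 : Nat) : Int) = -1) by omega)]
  rw [rfindFrom_take (w ++ rest) [' '] i0 (by simp; omega)]
  rw [List.take_append_of_le_length (by omega)]
  have hnone : PySem.Chars.rfind (w.take i0) [' '] = -1 := by
    apply rfind_go_none
    intro i hi hpre
    exact hsp (List.mem_of_mem_take (List.mem_of_mem_drop (space_prefix_mem _ hpre)))
  rw [hnone]
  congr 1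
  rw [show (-1 : Int) + 1 = ((0 : Nat) : Int) by norm_num]
  rw [show ((i0 : Nat) : Int) + 4 = ((i0 + 4 : Nat) : Int) by push_cast; ring]
  rw [PySem.Chars.slice_eq_listSlice, PySem.List.slice_natCast]
  rw [List.drop_zero, Nat.sub_zero, show i0 + 4 = w.length by omega,
      List.take_append_of_le_length le_rfl, List.take_length]

-- main loop invariant
theorem goA_eq_coreB (l : List Char) : ∀ (cur : List Char), ' ' ∉ cur → ¬ ethPat <:+: cur →
    getEthGo l cur = coreB (cur ++ l) := by
  induction l with
  | nil =>
    intro cur _ hinf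
    have hm : PySem.Chars.find cur ethPat = -1 :=
      (PySem.Chars.find_eq_neg_one_iff cur ethPat).2 hinf
    simp [getEthGo, coreB, hm]
  | cons c rest ih =>
    intro cur hsp hinf
    rw [getEthGo]
    by_cases hc : c = ' '
    · subst hc
      rw [if_pos rfl, ih [] (by simp) (by simp [ethPat])]
      simp only [List.nil_append]
      exact (coreB_space cur rest hinf).symm
    · rw [if_neg hc]
      simp only [show (['.', 'e', 't', 'h'] : List Char) = ethPat from rfl]
      have hsp' : ' ' ∉ cur ++ [c] := by
        simp only [List.mem_append, List.mem_singleton]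
        rintro (h | h)
        · exact hsp h
        · exact hc h.symm
      by_cases he : PySem.Chars.endswith (cur ++ [c]) ethPat
      · rw [if_pos he]
        have hsuf : ethPat <:+ cur ++ [c] := by
          rw [PySem.Chars.endswith, List.isSuffixOf_iff_suffix] at he
          exact he
        have hfirst : ¬ ethPat <:+: (cur ++ [c]).dropLast := by
          rwa [List.dropLast_concat]
        rw [show cur ++ c :: rest = (cur ++ [c]) ++ rest by simp]
        exact (coreB_found (cur ++ [c]) rest hsp' hsuf hfirst).symm
      · rw [if_neg he]
        have hinf' : ¬ ethPat <:+: cur ++ [c] := by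
          intro hcontra
          rw [infix_iff_prefix_drop] at hcontra
          obtain ⟨i, hp⟩ := hcontra
          have hi4 : i + 4 ≤ cur.length + 1 := by
            have := hp.length_le
            simp only [List.length_drop, List.length_append, List.length_singleton,
              show ethPat.length = 4 from rfl] at this
            by_cases hle : i ≤ cur.length + 1
            · omega
            · rw [List.drop_of_length_le (by simp; omega)] at hp
              simp [List.prefix_nil, ethPat] at hp
          by_cases hcase : i + 4 ≤ cur.length
          · rw [List.prefix_iff_eq_take, show ethPat.length = 4 from rfl,
                List.drop_append_of_le_length (by omega),
                List.take_append_of_le_length (by simp; omega)] at hp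
            have : ethPat <+: cur.drop i := hp ▸ List.take_prefix 4 _
            exact hinf (this.isInfix.trans (List.drop_suffix i cur).isInfix)
          · -- i + 4 = cur.length + 1: the occurrence is exactly the suffix
            have hlen : ((cur ++ [c]).drop i).length = 4 := by
              simp only [List.length_drop, List.length_append, List.length_singleton]
              omega
            have heq : ethPat = (cur ++ [c]).drop i :=
              List.IsPrefix.eq_of_length hp (by rw [hlen]; rfl)
            have : ethPat <:+ cur ++ [c] := heq ▸ List.drop_suffix i (cur ++ [c])
            exact he (by rwa [PySem.Chars.endswith, List.isSuffixOf_iff_suffix])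
        rw [ih (cur ++ [c]) hsp' hinf']
        congr 1
        simp

-- ===== VERDICT (by name: the statement is the Claim_ definition above) =====
theorem get_eth_name_spec : Claim_equal_get_eth_name := by
  intro s _
  unfold Spec_get_eth_name get_eth_name
  rw [alt_eq_coreB]
  simpa using goA_eq_coreB s.toList [] (by simp) (by simp [ethPat])
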